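-- pv_equiv track=rewrite | github.com/manuelmulloni/CodeGuru | Prova.py | tricky_logic
-- ===== SOURCE A (Python) =====
-- def tricky_logic(data):
--     result = []
--     i = 0
--     while i < len(data):
--         if data[i] % 2 == 0:
--             j = i
--             while j < len(data) and data[j] % 2 == 0:
--                 j += 1
--             result.append((i, j))
--             i = j
--         else:
--             i += 1
--     return result
-- ===== SOURCE B (Python) =====
-- from itertools import groupby
--
-- def tricky_logic(data):
--     result = []
--     offset = 0
--     for key, grp in groupby(data, key=lambda x: x % 2 == 0):
--         n = sum(1 for _ in grp)
--         if key:
--             result.append((offset, offset + n))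
--         offset += n
--     return result
-- ===== Notes on version B (the rewrite author's own statement) =====
-- stated objective: idiomatic
-- what changed: Replaced the nested index-jumping while loops with itertools.groupby over parity: one pass over the parity groups, deriving each even run's (start, end) from a running offset and the group length.
import Mathlib
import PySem

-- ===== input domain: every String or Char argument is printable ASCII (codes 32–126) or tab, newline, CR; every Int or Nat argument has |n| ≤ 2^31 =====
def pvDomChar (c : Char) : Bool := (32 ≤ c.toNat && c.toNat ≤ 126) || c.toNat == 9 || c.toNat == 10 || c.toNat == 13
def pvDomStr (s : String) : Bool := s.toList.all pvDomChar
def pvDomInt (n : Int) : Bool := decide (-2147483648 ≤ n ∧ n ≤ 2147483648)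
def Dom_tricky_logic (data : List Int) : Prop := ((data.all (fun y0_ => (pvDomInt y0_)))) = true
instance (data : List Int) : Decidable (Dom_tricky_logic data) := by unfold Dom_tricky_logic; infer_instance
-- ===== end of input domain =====

-- B replaces A's nested index-jumping while loops with a groupby-by-parity pass (more idiomatic); return values proved equal.

-- ===== PORT A =====
-- inner while loop: 'while j < len(data) and data[j] % 2 == 0: j += 1'
def tlInner (data : List Int) (j : Nat) : Nat :=
  if _h : j < data.length ∧ (data.getD j 0) % 2 == 0 then
    tlInner data (j + 1)
  else j
termination_by data.length - j

theorem tlInner_ge (data : List Int) (j : Nat) : j ≤ tlInner data j := by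
  unfold tlInner
  split
  · exact Nat.le_trans (Nat.le_succ j) (tlInner_ge data (j + 1))
  · exact Nat.le_refl j
termination_by data.length - j

-- outer while loop of A
def tlOuter (data : List Int) (i : Nat) (result : List (Int × Int)) : List (Int × Int) :=
  if _h : i < data.length then
    if (data.getD i 0) % 2 == 0 then
      let j := tlInner data i
      tlOuter data j (result ++ [((i : Int), (j : Int))])
    else
      tlOuter data (i + 1) result
  else result
termination_by data.length - i
decreasing_by
  · have h1 : i + 1 ≤ tlInner data (i + 1) := tlInner_ge data (i + 1)
    have : tlInner data i = tlInner data (i + 1) := by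
      rw [tlInner]; simp_all
    omega
  · omega

def tricky_logic (data : List Int) : List (Int × Int) := tlOuter data 0 []

-- ===== PORT B =====
-- itertools.groupby(data, key = x % 2 == 0), each group reduced to (key, length)
def tlGroups (data : List Int) : List (Bool × Nat) :=
  match data with
  | [] => []
  | x :: xs =>
    let k := x % 2 == 0
    (k, (xs.takeWhile (fun y => (y % 2 == 0) == k)).length + 1)
      :: tlGroups (xs.dropWhile (fun y => (y % 2 == 0) == k))
termination_by data.length
decreasing_by
  have := List.length_dropWhile_le (fun y => (y % 2 == 0) == (x % 2 == 0)) xs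
  simp; omega

-- the for loop over (key, group length) pairs with running offset
def tlFold (gs : List (Bool × Nat)) (offset : Nat) (result : List (Int × Int)) : List (Int × Int) :=
  match gs with
  | [] => result
  | (k, n) :: rest =>
    tlFold rest (offset + n)
      (if k then result ++ [((offset : Int), ((offset + n : Nat) : Int))] else result)

def tricky_logic_alt (data : List Int) : List (Int × Int) := tlFold (tlGroups data) 0 []

-- ===== PRECONDITION & SPEC =====
def Spec_tricky_logic (data : List Int) (out : List (Int × Int)) : Prop := out = tricky_logic_alt data
instance (data : List Int) (out : List (Int × Int)) : Decidable (Spec_tricky_logic data out) := by unfold Spec_tricky_logic; infer_instance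

-- ===== CLAIM (what is proved, stated in full; the proofs are below) =====
def Claim_equal_tricky_logic : Prop := ∀ (data : List Int), Dom_tricky_logic data → Spec_tricky_logic data (tricky_logic data)

-- ===== LEMMAS AND PROOFS =====

theorem drop_length_takeWhile {α : Type} (p : α → Bool) (l : List α) :
    l.drop (l.takeWhile p).length = l.dropWhile p := by
  induction l with
  | nil => simp
  | cons x xs ih =>
    by_cases h : p x = true <;> simp [h, ih]

theorem drop_cons_getD (data : List Int) (j : Nat) (hj : j < data.length) :
    data.drop j = data.getD j 0 :: data.drop (j + 1) := by
  rw [List.getD_eq_getElem _ _ hj, List.drop_eq_getElem_cons hj]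

theorem tlInner_eq (data : List Int) (j : Nat) :
    tlInner data j = j + ((data.drop j).takeWhile (fun y => y % 2 == 0)).length := by
  rw [tlInner]
  split
  next h =>
    rw [tlInner_eq data (j + 1), drop_cons_getD data j h.1,
      List.takeWhile_cons_of_pos (p := fun y => y % 2 == 0) h.2]
    simp only [List.length_cons]
    omega
  next h =>
    by_cases hj : j < data.length
    · have he : ((data.getD j 0) % 2 == 0) = false :=
        Bool.eq_false_iff.mpr (fun hc => h ⟨hj, hc⟩)
      rw [drop_cons_getD data j hj, List.takeWhile_cons, he]
      simp
    · rw [List.drop_eq_nil_of_le (Nat.le_of_not_lt hj)]; simp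
termination_by data.length - j

theorem tlFold_skip_odd (x : Int) (xs : List Int) (off : Nat) (acc : List (Int × Int))
    (hx : (x % 2 == 0) = false) :
    tlFold (tlGroups (x :: xs)) off acc = tlFold (tlGroups xs) (off + 1) acc := by
  rw [tlGroups]
  cases xs with
  | nil => simp [tlFold, hx, tlGroups]
  | cons y ys =>
    by_cases hy : (y % 2 == 0) = true
    · simp [tlFold, hx, hy]
    · conv_rhs => rw [tlGroups]
      simp only [Bool.not_eq_true] at hy
      simp [tlFold, hx, hy]
      ring_nf

theorem tricky_logic_core (data : List Int) (i : Nat) (acc : List (Int × Int)) :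
    tlOuter data i acc = tlFold (tlGroups (data.drop i)) i acc := by
  rw [tlOuter]
  split
  next hi =>
    have hd := drop_cons_getD data i hi
    by_cases he : ((data.getD i 0) % 2 == 0) = true
    · rw [if_pos he]
      rw [tricky_logic_core data (tlInner data i) (acc ++ [((i : Int), ((tlInner data i : Nat) : Int))])]
      have hj2 : tlInner data i
          = i + ((data.drop i).takeWhile (fun y => y % 2 == 0)).length := tlInner_eq data i
      have hdropj : data.drop (tlInner data i)
          = (data.drop i).dropWhile (fun y => y % 2 == 0) := by
        rw [hj2, ← List.drop_drop, drop_length_takeWhile]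
      have htw : ((data.drop i).takeWhile (fun y => y % 2 == 0)).length
          = ((data.drop (i + 1)).takeWhile (fun y => y % 2 == 0)).length + 1 := by
        rw [hd, List.takeWhile_cons_of_pos (p := fun y => y % 2 == 0) he, List.length_cons]
      have hdw : (data.drop i).dropWhile (fun y => y % 2 == 0)
          = (data.drop (i + 1)).dropWhile (fun y => y % 2 == 0) := by
        rw [hd, List.dropWhile_cons_of_pos (p := fun y => y % 2 == 0) he]
      conv_rhs => rw [hd, tlGroups]
      simp only [he]
      have hpred : (fun y : Int => (y % 2 == 0) == true) = (fun y : Int => y % 2 == 0) := by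
        funext y; cases h : (y % 2 == 0) <;> simp
      rw [hpred, tlFold]
      rw [hdropj, hdw, hj2, htw]
      simp
    · rw [if_neg he]
      rw [tricky_logic_core data (i + 1) acc, hd,
        tlFold_skip_odd _ _ _ _ (Bool.eq_false_iff.mpr he)]
  next hi =>
    rw [List.drop_eq_nil_of_le (Nat.le_of_not_lt hi)]
    simp [tlGroups, tlFold]
termination_by data.length - i
decreasing_by
  all_goals try omega
  all_goals
    have h1 : i + 1 ≤ tlInner data (i + 1) := tlInner_ge data (i + 1)
    have h2 : tlInner data i = tlInner data (i + 1) := by rw [tlInner]; simp_all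
    omega

-- ===== VERDICT (by name: the statement is the Claim_ definition above) =====
theorem tricky_logic_spec : Claim_equal_tricky_logic := by
  intro data _
  unfold Spec_tricky_logic tricky_logic tricky_logic_alt
  simpa using tricky_logic_core data 0 []
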